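-- pv_equiv track=rewrite | github.com/kdevo/op-dolphin-bot | op_dolphin_bot/open_project.py | guess_activity_type
-- ===== SOURCE A (Python) =====
-- def guess_activity_type(url):
--     """ Guesses the type (e.g. work_packages).
--     First, the given URL is split into parts. Then, it is checked for type occurrences in the URL (file) path.
--     The "rightmost" matching path part will the resulting type.
--
--     Examples:
--         ".../work_packages/21" -> will return "work_packages"
--         ".../work_packages/21/time_entries" -> will return "time_entries", not "work_packages"!
--     """
--     parts = url.split("/")
--     index = -1
--     guessed = None
--     for p in enumerate(parts):
--         for name in OpenProjectURL.ACTIVITY_FILTERS: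
--             if name in p and index < p[0]:
--                 guessed = p[1]
--                 index = p[0]
--     return guessed
--
-- class OpenProjectURL:
--     ACTIVITY_FILTERS = ('work_packages', 'wiki', 'news', 'documents', 'meetings', 'time_entries', 'cost_objects')
--
--     def __init__(self, base_url, project_id):
--         self.base_url = base_url
--         self.project_id = project_id
--
--     def _get_filter_str(self, activity_filters):
--         if activity_filters is None:
--             activity_filters = self.ACTIVITY_FILTERS
--         filter_str = "apply=true"
--         for f in activity_filters:
--             filter_str += "&show_{0}=1".format(f)
--         return filter_str
--
--     def build_activity_url(self, activity_filters=None):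
--         return "{base}/projects/{id}/activity?{filter}" \
--             .format(base=self.base_url, id=self.project_id, filter=self._get_filter_str(activity_filters))
--
--     def build_activity_atom_url(self, rss_key, activity_filters=None):
--         return "{base}/projects/{id}/activity.atom?key={key}&{filter}" \
--             .format(base=self.base_url, id=self.project_id, key=rss_key, filter=self._get_filter_str(activity_filters))
--
--     @staticmethod
--     def part_to_text(url_part):
--         return url_part.replace('_', ' ').capitalize()
-- ===== SOURCE B (Python) =====
-- def guess_activity_type(url):
--     for part in reversed(url.split("/")):
--         if part in OpenProjectURL.ACTIVITY_FILTERS: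
--             return part
--     return None
--
-- class OpenProjectURL:
--     ACTIVITY_FILTERS = ('work_packages', 'wiki', 'news', 'documents', 'meetings', 'time_entries', 'cost_objects')
-- ===== Notes on version B (the rewrite author's own statement) =====
-- stated objective: simpler
-- what changed: Replaces the forward double loop with max-index/guessed accumulators by a single reverse scan over the split parts with an early return on the first exact filter match.
import Mathlib
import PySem

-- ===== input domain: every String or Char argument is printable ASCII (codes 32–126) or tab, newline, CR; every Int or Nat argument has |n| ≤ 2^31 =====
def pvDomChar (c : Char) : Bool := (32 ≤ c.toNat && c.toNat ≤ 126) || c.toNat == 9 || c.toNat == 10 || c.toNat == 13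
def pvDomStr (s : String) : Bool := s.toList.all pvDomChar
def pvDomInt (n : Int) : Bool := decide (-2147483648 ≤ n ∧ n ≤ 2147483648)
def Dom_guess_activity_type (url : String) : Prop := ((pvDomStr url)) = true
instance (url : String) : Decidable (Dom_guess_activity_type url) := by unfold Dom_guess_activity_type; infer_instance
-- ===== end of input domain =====

-- B replaces A's forward double loop with max-index/guessed accumulators by a single
-- reverse scan with early return (objective: simpler). Return value only; no mutation.

-- ===== PORT A =====
def pvFilters : List String :=
  ["work_packages", "wiki", "news", "documents", "meetings", "time_entries", "cost_objects"]

-- Python's `name in p` with p = (index, part): tuple membership, i.e. name == index or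
-- name == part; name (str) never equals the int index, so it is exactly `name == p.2`.
def pvInnerStep (p : Int × String) (st : Int × Option String) (name : String) :
    Int × Option String :=
  if name == p.2 && decide (st.1 < p.1) then (p.1, some p.2) else st

def guess_activity_type (url : String) : Option String :=
  let parts := (PySem.Str.split? url "/").getD []
  let st := (PySem.List.enumerate parts).foldl
    (fun st p => pvFilters.foldl (pvInnerStep p) st) (-1, none)
  st.2

-- ===== PORT B =====
def pvRevScan : List String → Option String
  | [] => none
  | part :: rest => if pvFilters.contains part then some part else pvRevScan rest

def guess_activity_type_alt (url : String) : Option String :=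
  pvRevScan ((PySem.Str.split? url "/").getD []).reverse

-- ===== PRECONDITION & SPEC =====
def Spec_guess_activity_type (url : String) (out : Option String) : Prop := out = guess_activity_type_alt url
instance (url : String) (out : Option String) : Decidable (Spec_guess_activity_type url out) := by unfold Spec_guess_activity_type; infer_instance

-- ===== CLAIM (what is proved, stated in full; the proofs are below) =====
def Claim_equal_guess_activity_type : Prop := ∀ (url : String), Dom_guess_activity_type url → Spec_guess_activity_type url (guess_activity_type url)

-- ===== LEMMAS AND PROOFS =====

theorem pvInner_eq (L : List String) (p : Int × String) (st : Int × Option String) :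
    L.foldl (pvInnerStep p) st =
      if p.2 ∈ L ∧ st.1 < p.1 then (p.1, some p.2) else st := by
  induction L generalizing st with
  | nil => simp
  | cons a L ih =>
    by_cases ha : a = p.2 ∧ st.1 < p.1
    · simp [pvInnerStep, ha.1, ha.2, List.foldl_cons, ih]
    · have hstep : pvInnerStep p st a = st := by
        unfold pvInnerStep
        rcases Decidable.not_and_iff_not_or_not.mp ha with h | h <;> simp [h]
      rw [List.foldl_cons, hstep, ih]
      by_cases hm : p.2 ∈ L ∧ st.1 < p.1
      · simp [hm]
      · have hno : ¬ (p.2 ∈ a :: L ∧ st.1 < p.1) := by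
          rintro ⟨hmem, hlt⟩
          rcases List.mem_cons.mp hmem with h | h
          · exact ha ⟨h.symm, hlt⟩
          · exact hm ⟨h, hlt⟩
        rw [if_neg hm, if_neg hno]

theorem pvRevScan_append (l1 l2 : List String) :
    pvRevScan (l1 ++ l2) =
      match pvRevScan l1 with
      | some x => some x
      | none => pvRevScan l2 := by
  induction l1 with
  | nil => simp [pvRevScan]
  | cons a l1 ih =>
    simp only [List.cons_append, pvRevScan, ih]
    by_cases h : a ∈ pvFilters
    · simp [h]
    · simp [h]

theorem pvOuter (parts : List String) : ∀ (s : Int) (st : Int × Option String), st.1 < s →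
    ((PySem.List.enumerate parts s).foldl
        (fun st p => pvFilters.foldl (pvInnerStep p) st) st).2 =
      match pvRevScan parts.reverse with
      | some x => some x
      | none => st.2 := by
  induction parts with
  | nil => intro s st h; simp [pvRevScan]
  | cons x rest ih =>
    intro s st h
    rw [PySem.List.enumerate_cons, List.foldl_cons, pvInner_eq]
    by_cases hx : x ∈ pvFilters
    · have hcond : x ∈ pvFilters ∧ st.1 < s := ⟨hx, h⟩
      rw [if_pos hcond, ih (s + 1) (s, some x) (by simp)]
      have hsingle : pvRevScan [x] = some x := by
        simp [pvRevScan, hx]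
      rw [List.reverse_cons, pvRevScan_append, hsingle]
      cases pvRevScan rest.reverse <;> rfl
    · rw [if_neg (by exact fun hc => hx hc.1), ih (s + 1) st (lt_trans h (by omega))]
      have hsingle : pvRevScan [x] = none := by
        simp [pvRevScan, hx]
      rw [List.reverse_cons, pvRevScan_append, hsingle]
      cases pvRevScan rest.reverse <;> rfl

-- ===== VERDICT (by name: the statement is the Claim_ definition above) =====
theorem guess_activity_type_spec : Claim_equal_guess_activity_type := by
  intro url _
  unfold Spec_guess_activity_type guess_activity_type guess_activity_type_alt
  rw [pvOuter ((PySem.Str.split? url "/").getD []) 0 (-1, none) (by norm_num)]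
  cases pvRevScan ((PySem.Str.split? url "/").getD []).reverse <;> rfl
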